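-- pv_equiv track=rewrite | github.com/LukasGritsch/UNI | 1.Semester/Programmiertechnik/ExerciseSheetKlausur.py | isProth
-- ===== SOURCE A (Python) =====
-- def isProth(m):
--     for n in range(1,m+1):
--         if 2**n <= m:
--             for k in range(1,2**n,2):
--                 if k*2**n +1 == m:
--                     return True
--         else:
--             return False
-- ===== SOURCE B (Python) =====
-- def isProth(m):
--     # Factor m-1 = t * 2**n with t odd; m is Proth iff n >= 1 and t < 2**n.
--     if m < 1:
--         return None
--     t = m - 1
--     n = 0
--     p = 1
--     while t > 0 and t % 2 == 0:
--         t //= 2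
--         n += 1
--         p *= 2
--     return n >= 1 and t < p
-- ===== Notes on version B (the rewrite author's own statement) =====
-- stated objective: faster
-- what changed: Replaces A's scan over every n up to m (each with an inner scan over all odd k below 2**n) by stripping the trailing power of two out of m-1 once and comparing the odd quotient with it.
import Mathlib
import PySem

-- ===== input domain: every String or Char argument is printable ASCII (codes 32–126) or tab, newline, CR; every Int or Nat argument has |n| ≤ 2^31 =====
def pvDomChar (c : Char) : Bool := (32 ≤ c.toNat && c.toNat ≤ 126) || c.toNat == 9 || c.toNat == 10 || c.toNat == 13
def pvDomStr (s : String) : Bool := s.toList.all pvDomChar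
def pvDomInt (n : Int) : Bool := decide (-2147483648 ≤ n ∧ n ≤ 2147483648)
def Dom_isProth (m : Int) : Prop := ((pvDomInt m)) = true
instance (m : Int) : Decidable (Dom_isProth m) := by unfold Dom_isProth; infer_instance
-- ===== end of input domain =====

-- B replaces A's scan over every n up to m (with an inner scan over all odd k below 2**n)
-- by stripping the trailing power of two out of m-1 once.  Returns none exactly where the
-- Python returns None (m < 1).

-- ===== PORT A =====
-- inner 'for k in range(1, 2**n, 2): if k*2**n+1 == m: return True' ; falling off = false
def isProthInner (m tn : Int) : List Int → Bool
  | [] => false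
  | k :: rest => if k * tn + 1 = m then true else isProthInner m tn rest

-- outer 'for n in range(1, m+1)'; every n in the range satisfies 1 ≤ n, so Python's
-- 2**n is exactly (2 : Int) ^ n.toNat here.
def isProthLoop (m : Int) : List Int → Option Bool
  | [] => none
  | n :: rest =>
    let tn : Int := 2 ^ n.toNat
    if tn ≤ m then
      if isProthInner m tn (PySem.List.pyRange 1 tn 2) then some true
      else isProthLoop m rest
    else some false

def isProth (m : Int) : Option Bool :=
  isProthLoop m (PySem.List.pyRange 1 (m + 1) 1)

-- ===== PORT B =====
-- 'while t > 0 and t % 2 == 0: t //= 2; n += 1; p *= 2' ; state (t, n, p)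
def stripTwos (t n p : Int) : Int × Int × Int :=
  if h : 0 < t ∧ PySem.Int.mod t 2 = 0 then
    stripTwos (PySem.Int.floordiv t 2) (n + 1) (p * 2)
  else (t, n, p)
termination_by t.toNat
decreasing_by
  have h2 : (2 : Int) ∣ t := (PySem.Int.mod_eq_zero_iff_dvd t 2).mp h.2
  have : PySem.Int.floordiv t 2 = t / 2 := by
    simp [PySem.Int.floordiv, Int.fdiv_eq_ediv]
  omega

def isProth_alt (m : Int) : Option Bool :=
  if m < 1 then none
  else
    let r := stripTwos (m - 1) 0 1
    some (decide (1 ≤ r.2.1) && decide (r.1 < r.2.2))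

-- ===== PRECONDITION & SPEC =====
def Spec_isProth (m : Int) (out : Option Bool) : Prop := out = isProth_alt m
instance (m : Int) (out : Option Bool) : Decidable (Spec_isProth m out) := by unfold Spec_isProth; infer_instance

-- ===== CLAIM (what is proved, stated in full; the proofs are below) =====
def Claim_equal_isProth : Prop := ∀ (m : Int), Dom_isProth m → Spec_isProth m (isProth m)

-- ===== LEMMAS AND PROOFS =====

-- m is a Proth witness at exponent n : ℕ
def ProthAt (m : Int) (n : ℕ) : Prop :=
  ∃ k : Int, 1 ≤ k ∧ k % 2 = 1 ∧ k < 2 ^ n ∧ k * 2 ^ n + 1 = m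

-- the inner loop finds a k in its list with k*tn+1 = m
lemma isProthInner_eq_true_iff (m tn : Int) (ks : List Int) :
    isProthInner m tn ks = true ↔ ∃ k ∈ ks, k * tn + 1 = m := by
  induction ks with
  | nil => simp [isProthInner]
  | cons k rest ih =>
    simp only [isProthInner]
    split_ifs with hk
    · simp [hk]
    · simp [ih, hk]

-- the inner loop over range(1, 2^n, 2) decides ProthAt m n
lemma isProthInner_range (m : Int) (n : ℕ) :
    isProthInner m (2 ^ n) (PySem.List.pyRange 1 (2 ^ n) 2) = true ↔ ProthAt m n := by
  rw [isProthInner_eq_true_iff]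
  constructor
  · rintro ⟨k, hk, hkm⟩
    rw [PySem.List.mem_pyRange_iff_of_pos (by norm_num)] at hk
    exact ⟨k, hk.1, by omega, hk.2.1, hkm⟩
  · rintro ⟨k, h1, h2, h3, h4⟩
    refine ⟨k, ?_, h4⟩
    rw [PySem.List.mem_pyRange_iff_of_pos (by norm_num)]
    exact ⟨h1, h3, by omega⟩

-- every n ≥ 1 has 2^n > n (Int version used to show the loop always terminates via 'else')
lemma int_lt_two_pow (n : ℕ) : (n : Int) < 2 ^ n := by
  exact_mod_cast Nat.lt_two_pow_self

-- the outer loop from a: some true iff a witness at some n ≥ a exists, some false otherwise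
lemma isProthLoop_spec (m : Int) (hm : 1 ≤ m) :
    ∀ cnt (a : Int), 1 ≤ a → a ≤ m → (m - a).toNat ≤ cnt →
    ∃ b, isProthLoop m (PySem.List.pyRange a (m + 1) 1) = some b ∧
      (b = true ↔ ∃ n : ℕ, a ≤ (n : Int) ∧ ProthAt m n) := by
  intro cnt
  induction cnt with
  | zero =>
    intro a ha ham hcnt
    have haeq : a = m := by omega
    rw [PySem.List.pyRange_one_cons (by omega)]
    simp only [isProthLoop]
    have hgt : m < 2 ^ a.toNat := by
      have := int_lt_two_pow a.toNat
      omega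
    rw [if_neg (by omega)]
    refine ⟨false, rfl, by simp; intro n hn ⟨k, h1, h2, h3, h4⟩; nlinarith [pow_le_pow_right₀ (by norm_num : (1:Int) ≤ 2) (show a.toNat ≤ n by omega)]⟩
  | succ cnt ih =>
    intro a ha ham hcnt
    rw [PySem.List.pyRange_one_cons (by omega)]
    simp only [isProthLoop]
    by_cases hle : (2 : Int) ^ a.toNat ≤ m
    · rw [if_pos hle]
      by_cases hin : isProthInner m (2 ^ a.toNat) (PySem.List.pyRange 1 (2 ^ a.toNat) 2) = true
      · rw [if_pos hin]
        rw [isProthInner_range] at hin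
        exact ⟨true, rfl, by simp; exact ⟨a.toNat, by omega, hin⟩⟩
      · rw [if_neg hin]
        rw [isProthInner_range] at hin
        have halt : a < m := by
          have := int_lt_two_pow a.toNat
          omega
        obtain ⟨b, hb, hiff⟩ := ih (a + 1) (by omega) (by omega) (by omega)
        refine ⟨b, hb, hiff.trans ?_⟩
        constructor
        · rintro ⟨n, hn, hp⟩; exact ⟨n, by omega, hp⟩
        · rintro ⟨n, hn, hp⟩
          refine ⟨n, ?_, hp⟩
          rcases eq_or_lt_of_le hn with heq | hlt
          · exfalso; apply hin
            have : n = a.toNat := by omega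
            rwa [← this]
          · omega
    · rw [if_neg hle]
      refine ⟨false, rfl, by simp; intro n hn ⟨k, h1, h2, h3, h4⟩; nlinarith [pow_le_pow_right₀ (by norm_num : (1:Int) ≤ 2) (show a.toNat ≤ n by omega)]⟩

-- stripTwos on t = k * 2^j with k odd returns (k, n+j, p*2^j)
lemma stripTwos_odd (k : Int) (hk : 1 ≤ k) (hodd : k % 2 = 1) :
    ∀ (j : ℕ) (n p : Int), stripTwos (k * 2 ^ j) n p = (k, n + j, p * 2 ^ j) := by
  intro j
  induction j with
  | zero =>
    intro n p
    rw [stripTwos]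
    rw [dif_neg]
    · simp
    · rintro ⟨-, hmod⟩
      have : (2 : Int) ∣ k * 2 ^ 0 := (PySem.Int.mod_eq_zero_iff_dvd _ 2).mp hmod
      simp at this
      omega
  | succ j ihj =>
    intro n p
    rw [stripTwos]
    rw [dif_pos]
    · have hdiv : PySem.Int.floordiv (k * 2 ^ (j + 1)) 2 = k * 2 ^ j := by
        have : k * 2 ^ (j + 1) = (k * 2 ^ j) * 2 := by ring
        rw [this]
        simp [PySem.Int.floordiv, Int.mul_fdiv_cancel _ (by norm_num : (2:Int) ≠ 0)]
      rw [hdiv, ihj]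
      refine Prod.ext rfl (Prod.ext ?_ ?_) <;> simp <;> ring
    · constructor
      · positivity
      · rw [PySem.Int.mod_eq_zero_iff_dvd]
        exact ⟨k * 2 ^ j, by ring⟩

-- uniqueness of the odd × power-of-two decomposition
lemma odd_pow_two_unique (k k' : Int) (_hk : 1 ≤ k) (_hk' : 1 ≤ k')
    (ho : k % 2 = 1) (ho' : k' % 2 = 1) :
    ∀ (i : ℕ), ∀ j, k * 2 ^ i = k' * 2 ^ j → i = j ∧ k = k' := by
  intro i
  induction i with
  | zero =>
    intro j h
    cases j with
    | zero => simp at h; omega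
    | succ j =>
      exfalso
      simp at h
      have : (2 : Int) ∣ k := ⟨k' * 2 ^ j, by rw [h]; ring⟩
      omega
  | succ i ihi =>
    intro j h
    cases j with
    | zero =>
      exfalso
      simp at h
      have : (2 : Int) ∣ k' := ⟨k * 2 ^ i, by rw [← h]; ring⟩
      omega
    | succ j =>
      have h2 : k * 2 ^ i = k' * 2 ^ j := by
        have : (k * 2 ^ i) * 2 = (k' * 2 ^ j) * 2 := by
          calc (k * 2 ^ i) * 2 = k * 2 ^ (i + 1) := by ring
          _ = k' * 2 ^ (j + 1) := h
          _ = (k' * 2 ^ j) * 2 := by ring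
        omega
      obtain ⟨hij, hkk⟩ := ihi j h2
      exact ⟨by omega, hkk⟩

-- B decides the same predicate: for m ≥ 1, isProth_alt m = some b with b ↔ ∃ n ≥ 1, ProthAt m n
lemma isProth_alt_spec (m : Int) (hm : 1 ≤ m) :
    ∃ b, isProth_alt m = some b ∧ (b = true ↔ ∃ n : ℕ, 1 ≤ (n : Int) ∧ ProthAt m n) := by
  unfold isProth_alt
  rw [if_neg (by omega)]
  by_cases h1 : m = 1
  · subst h1
    have h0 : stripTwos 0 0 1 = (0, 0, 1) := by
      rw [stripTwos]; rw [dif_neg (by omega)]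
    simp only [show (1 : Int) - 1 = 0 by norm_num, h0]
    refine ⟨false, by norm_num, by simp; rintro n - ⟨k, h1, h2, h3, h4⟩; nlinarith [pow_pos (show (0:Int) < 2 by norm_num) n]⟩
  · -- m ≥ 2, so m - 1 ≥ 1 has an odd × power-of-two decomposition
    have hm1 : (1 : Int) ≤ m - 1 := by omega
    obtain ⟨j, w, hw, hnat⟩ := Nat.exists_eq_two_pow_mul_odd (n := (m - 1).toNat) (by omega)
    have hwodd : (w : Int) % 2 = 1 := by
      obtain ⟨c, hc⟩ := hw; omega
    have hw1 : (1 : Int) ≤ w := by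
      rcases Nat.eq_zero_or_pos w with h | h
      · subst h; simp at hnat; omega
      · exact_mod_cast h
    have hdec : m - 1 = (w : Int) * 2 ^ j := by
      have : ((m - 1).toNat : Int) = m - 1 := by omega
      rw [← this]; push_cast [hnat]; ring
    rw [hdec, stripTwos_odd (w : Int) hw1 hwodd j 0 1]
    refine ⟨_, rfl, ?_⟩
    simp only [Bool.and_eq_true, decide_eq_true_eq, zero_add, one_mul]
    constructor
    · rintro ⟨hj, hwlt⟩
      exact ⟨j, by omega, ⟨w, hw1, hwodd, hwlt, by omega⟩⟩
    · rintro ⟨n, hn, k, hk1, hko, hklt, hkm⟩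
      have hkeq : k * 2 ^ n = (w : Int) * 2 ^ j := by omega
      obtain ⟨hnj, hkw⟩ := odd_pow_two_unique k w hk1 hw1 hko hwodd n j hkeq
      subst hnj
      exact ⟨by omega, by omega⟩

-- ===== VERDICT (by name: the statement is the Claim_ definition above) =====
theorem isProth_spec : Claim_equal_isProth := by
  intro m _
  unfold Spec_isProth
  by_cases hm : 1 ≤ m
  · obtain ⟨b, hb, hiff⟩ := isProthLoop_spec m hm (m - 1).toNat 1 le_rfl hm le_rfl
    obtain ⟨b', hb', hiff'⟩ := isProth_alt_spec m hm
    have : b = b' := by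
      cases b <;> cases b' <;> simp_all
      obtain ⟨n, hn, hp⟩ := hiff'
      exact hiff n hn hp
    unfold isProth
    rw [hb, hb', this]
  · unfold isProth isProth_alt
    rw [PySem.List.pyRange_one_eq_nil (by omega), if_pos (by omega)]
    rfl
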